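-- pv_equiv track=rewrite | github.com/dakiddo-Eri/Thumby | House 26 OS.py | is_num_token
-- ===== SOURCE A (Python) =====
-- def is_num_token(t):
--     if t == '':
--         return 0
--     dots = 0
--     i = 0
--     while i < len(t):
--         c = t[i]
--         if c == '.':
--             dots += 1
--             if dots > 1:
--                 return 0
--         elif c < '0' or c > '9':
--             return 0
--         i += 1
--     return 1
-- ===== SOURCE B (Python) =====
-- def is_num_token(t):
--     if t == '':
--         return 0
--     if t.count('.') > 1:
--         return 0
--     return 1 if all(c == '.' or not (c < '0' or c > '9') for c in t) else 0
-- ===== Notes on version B (the rewrite author's own statement) =====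
-- stated objective: simpler
-- what changed: Replaces A's single interleaved while-loop with a mutable dot counter and early returns by two loop-free passes: a dot count via the str.count built-in followed by an all() character validation.
import Mathlib
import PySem

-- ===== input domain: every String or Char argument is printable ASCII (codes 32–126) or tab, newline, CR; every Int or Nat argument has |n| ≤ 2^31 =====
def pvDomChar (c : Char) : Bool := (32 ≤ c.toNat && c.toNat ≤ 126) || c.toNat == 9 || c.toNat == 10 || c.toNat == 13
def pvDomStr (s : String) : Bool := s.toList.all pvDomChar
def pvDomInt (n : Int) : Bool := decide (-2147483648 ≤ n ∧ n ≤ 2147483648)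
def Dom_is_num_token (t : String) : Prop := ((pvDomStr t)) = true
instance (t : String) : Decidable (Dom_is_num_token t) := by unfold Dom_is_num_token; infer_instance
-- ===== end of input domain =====

-- B replaces A's single interleaved scan (mutable dot counter, early returns) by two
-- loop-free passes: a dot count, then an all-characters-valid check. Objective: simpler.

-- ===== PORT A =====
-- the while loop over indices, carried as structural recursion on the remaining characters
-- with the 'dots' accumulator
def isNumTokenLoop : List Char → Int → Int
  | [], _ => 1
  | c :: cs, dots =>
    if c = '.' then
      if dots + 1 > 1 then 0 else isNumTokenLoop cs (dots + 1)
    else if c < '0' ∨ c > '9' then 0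
    else isNumTokenLoop cs dots

def is_num_token (t : String) : Int :=
  if t = "" then 0 else isNumTokenLoop t.toList 0

-- ===== PORT B =====
-- t.count('.') for a single-character needle is List.count on the characters
def is_num_token_alt (t : String) : Int :=
  if t = "" then 0
  else if (t.toList.count '.' : Int) > 1 then 0
  else if t.toList.all (fun c => c = '.' || !(c < '0' || c > '9')) then 1 else 0

-- ===== PRECONDITION & SPEC =====
def Spec_is_num_token (t : String) (out : Int) : Prop := out = is_num_token_alt t
instance (t : String) (out : Int) : Decidable (Spec_is_num_token t out) := by unfold Spec_is_num_token; infer_instance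

-- ===== CLAIM =====
def Claim_equal_is_num_token : Prop := ∀ (t : String), Dom_is_num_token t → Spec_is_num_token t (is_num_token t)

-- ===== LEMMAS AND PROOFS =====
theorem isNumTokenLoop_eq (cs : List Char) (dots : Int) (h0 : 0 ≤ dots) (h1 : dots ≤ 1) :
    isNumTokenLoop cs dots =
      if (cs.count '.' : Int) + dots > 1 then 0
      else if cs.all (fun c => c = '.' || !(c < '0' || c > '9')) then 1 else 0 := by
  induction cs generalizing dots with
  | nil => simp [isNumTokenLoop]; omega
  | cons c cs ih =>
    by_cases hc : c = '.'
    · subst hc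
      by_cases hd : dots + 1 > 1
      · have : dots = 1 := by omega
        subst this
        simp [isNumTokenLoop]
      · have : dots = 0 := by omega
        subst this
        show (if (0:Int) + 1 > 1 then 0 else isNumTokenLoop cs (0+1)) = _
        rw [if_neg hd, ih (0+1) (by omega) (by omega)]
        simp
    · by_cases hv : c < '0' ∨ c > '9'
      · simp [isNumTokenLoop, hc, hv, List.all_cons]
        intro _ h2 h3
        rcases hv with h | h
        · exact absurd h2 (not_le.mpr h)
        · exact absurd h (not_lt.mpr h3)
      · simp only [isNumTokenLoop, if_neg hc, if_neg hv]
        rw [ih dots h0 h1]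
        have hcnt : ((c :: cs).count '.' : Int) = (cs.count '.' : Int) := by
          simp [hc]
        rw [hcnt]
        have hall : (c :: cs).all (fun c => c = '.' || !(c < '0' || c > '9')) =
            cs.all (fun c => c = '.' || !(c < '0' || c > '9')) := by
          simp [List.all_cons]
          intro _; right
          push Not at hv
          exact ⟨by simpa using hv.1, by simpa using hv.2⟩
        rw [hall]

-- ===== VERDICT =====
theorem is_num_token_spec : Claim_equal_is_num_token := by
  intro t _
  unfold Spec_is_num_token is_num_token is_num_token_alt
  by_cases ht : t = ""
  · simp [ht]
  · simp only [if_neg ht]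
    rw [isNumTokenLoop_eq t.toList 0 le_rfl (by omega)]
    simp
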